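-- pv_equiv track=rewrite | github.com/Ovid/sqlitch-v2 | sqlitch/cli/commands/config.py | _set_config_value
-- ===== SOURCE A (Python) =====
-- def _set_config_value(
--     lines: list[str], section: str, option: str, value: str
-- ) -> list[str]:
--     new_lines = list(lines)
--     start, end, header_index = _find_section_bounds(new_lines, section)
--
--     if start is None:
--         if section != "DEFAULT":
--             new_lines.append(f"[{section}]")
--             indent = "\t"
--             new_lines.append(f"{indent}{option} = {value}")
--         else:
--             new_lines.append(f"{option} = {value}")
--         return new_lines
--
--     indent_default = "" if section == "DEFAULT" else "\t"
--     indent = _detect_indent(new_lines[start:end], indent_default)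
--
--     for idx in range(start, end):
--         stripped = new_lines[idx].strip()
--         if not stripped or stripped.startswith("#") or stripped.startswith(";"):
--             continue
--         key, sep, _ = stripped.partition("=")
--         if sep and key.strip() == option:
--             new_lines[idx] = f"{indent}{option} = {value}"
--             return new_lines
--
--     insertion_index = start
--     for idx in range(start, end):
--         stripped = new_lines[idx].strip()
--         if not stripped or stripped.startswith("#") or stripped.startswith(";"):
--             insertion_index = idx
--             break
--         insertion_index = idx + 1
--     else:
--         insertion_index = end
--     new_lines.insert(insertion_index, f"{indent}{option} = {value}")
--     return new_lines
--
-- def _find_section_bounds(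
--     lines: list[str], section: str
-- ) -> tuple[int | None, int | None, int | None]:
--     if section == "DEFAULT":
--         start = 0
--         if lines and lines[0].strip().lower() == "[default]":
--             start = 1
--         end = _find_next_section(lines, start)
--         return start, end, None
--
--     header = f"[{section}]"
--     for idx, line in enumerate(lines):
--         if line.strip() == header:
--             end = _find_next_section(lines, idx + 1)
--             return idx + 1, end, idx
--     return None, None, None
--
-- def _find_next_section(lines: list[str], start: int) -> int:
--     for idx in range(start, len(lines)):
--         stripped = lines[idx].strip()
--         if stripped.startswith("[") and stripped.endswith("]") and not stripped.startswith("#"):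
--             return idx
--     return len(lines)
--
-- def _detect_indent(lines: list[str], default: str) -> str:
--     for line in lines:
--         stripped = line.lstrip("\t ")
--         if not stripped or stripped.startswith("#") or stripped.startswith(";"):
--             continue
--         return line[: len(line) - len(stripped)]
--     return default
-- ===== SOURCE B (Python) =====
-- """Segment-splitting re-implementation of _set_config_value:
-- slice the file into before/segment/after once, transform the segment with
-- small pure helpers, rebuild by concatenation (no index arithmetic)."""
--
--
-- def _is_skip(line):
--     s = line.strip()
--     return not s or s[0] in "#;"
--
--
-- def _is_section_header(line):
--     s = line.strip()
--     return s.startswith("[") and s.endswith("]")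
--
--
-- def _split_indent(line):
--     n = 0
--     while n < len(line) and line[n] in "\t ":
--         n += 1
--     return line[:n], line[n:]
--
--
-- def _matches_option(line, option):
--     if _is_skip(line):
--         return False
--     key, sep, _ = line.strip().partition("=")
--     return bool(sep) and key.strip() == option
--
--
-- def _split_after_header(lines, header):
--     """(prefix up to and including the first line stripping to header, rest), or None."""
--     for i, line in enumerate(lines):
--         if line.strip() == header:
--             return lines[:i + 1], lines[i + 1:]
--     return None
--
--
-- def _split_at_section(rest):
--     """(lines before the next section header, that header and everything after)."""
--     for j, line in enumerate(rest):
--         if _is_section_header(line):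
--             return rest[:j], rest[j:]
--     return rest, []
-- def _detect_indent_b(seg, default):
--     for line in seg:
--         indent, tail = _split_indent(line)
--         if tail and tail[0] not in "#;":
--             return indent
--     return default
--
--
-- def _replace_option(seg, option, new_line):
--     """Segment with the first assignment to `option` replaced, or None if absent."""
--     for k, line in enumerate(seg):
--         if _matches_option(line, option):
--             return seg[:k] + [new_line] + seg[k + 1:]
--     return None
--
--
-- def _insert_at_gap(seg, new_line):
--     """Insert before the first blank/comment line, else append."""
--     for k, line in enumerate(seg):
--         if _is_skip(line):
--             return seg[:k] + [new_line] + seg[k:]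
--     return seg + [new_line]
--
--
-- def _set_config_value(lines, section, option, value):
--     if section == "DEFAULT":
--         skip = 1 if lines and lines[0].strip().lower() == "[default]" else 0
--         before, rest = lines[:skip], lines[skip:]
--         indent_default = ""
--     else:
--         split = _split_after_header(lines, f"[{section}]")
--         if split is None:
--             return lines + [f"[{section}]", f"\t{option} = {value}"]
--         before, rest = split
--         indent_default = "\t"
--     seg, after = _split_at_section(rest)
--     new_line = f"{_detect_indent_b(seg, indent_default)}{option} = {value}"
--     body = _replace_option(seg, option, new_line)
--     if body is None:
--         body = _insert_at_gap(seg, new_line)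
--     return before + body + after
-- ===== Notes on version B (the rewrite author's own statement) =====
-- stated objective: alternative
-- what changed: Replaces A's copy-and-mutate design (section bounds as integer indices into the whole list, two range(start,end) index loops, in-place assignment and insert) with one recursive segment decomposition: split the file into before/segment/after once, transform the segment with small pure helpers (replace-first-assignment, insert-before-first-gap), and rebuild by concatenation.
import Mathlib
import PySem

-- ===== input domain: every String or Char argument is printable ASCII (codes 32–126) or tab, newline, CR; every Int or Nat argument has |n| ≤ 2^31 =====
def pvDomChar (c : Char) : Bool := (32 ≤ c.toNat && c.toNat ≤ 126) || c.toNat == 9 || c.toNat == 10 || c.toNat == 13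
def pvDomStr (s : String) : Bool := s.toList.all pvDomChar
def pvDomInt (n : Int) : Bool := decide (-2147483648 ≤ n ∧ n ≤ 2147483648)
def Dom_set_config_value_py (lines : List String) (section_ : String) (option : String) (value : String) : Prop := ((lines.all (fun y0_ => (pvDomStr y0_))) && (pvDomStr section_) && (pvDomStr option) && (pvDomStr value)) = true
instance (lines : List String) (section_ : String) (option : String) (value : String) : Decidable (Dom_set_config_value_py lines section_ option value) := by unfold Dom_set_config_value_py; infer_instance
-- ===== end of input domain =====

-- B re-decomposes A's index-arithmetic scans into one before/segment/after split with
-- small recursive helpers on the segment (objective: alternative; return value only).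

-- ===== PORT A =====
-- _find_next_section header test: stripped.startswith("[") and stripped.endswith("]") and not stripped.startswith("#")
def aIsNextHeader (line : String) : Bool :=
  let stripped := PySem.Str.strip line
  PySem.Str.startswith stripped "[" && PySem.Str.endswith stripped "]" && !PySem.Str.startswith stripped "#"

-- _find_next_section's for-loop over range(start, len(lines))
def find_next_section (lines : List String) (idx : Nat) : Nat :=
  if h : idx < lines.length then
    if aIsNextHeader (PySem.List.pyGetD lines (idx : Int) "") then idx
    else find_next_section lines (idx + 1)
  else lines.length
termination_by lines.length - idx
decreasing_by all_goals omega

-- the enumerate loop of _find_section_bounds: first idx with line.strip() == header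
def find_header_idx (lines : List String) (header : String) (idx : Nat) : Option Nat :=
  if h : idx < lines.length then
    if PySem.Str.strip (PySem.List.pyGetD lines (idx : Int) "") == header then some idx
    else find_header_idx lines header (idx + 1)
  else none
termination_by lines.length - idx
decreasing_by all_goals omega

-- _find_section_bounds (the unused header_index component is dropped)
def find_section_bounds (lines : List String) (section_ : String) : Option (Nat × Nat) :=
  if section_ == "DEFAULT" then
    let start : Nat :=
      if (match lines with
          | [] => false
          | l0 :: _ => PySem.Str.lower (PySem.Str.strip l0) == "[default]") then 1 else 0
    some (start, find_next_section lines start)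
  else
    match find_header_idx lines ("[" ++ section_ ++ "]") 0 with
    | some idx => some (idx + 1, find_next_section lines (idx + 1))
    | none => none

-- _detect_indent; line.lstrip("\t ") is ported by hand as dropWhile over the code points (exact)
def detect_indent : List String → String → String
  | [], dflt => dflt
  | line :: rest, dflt =>
    let stripped := line.toList.dropWhile (fun c => c == '\t' || c == ' ')
    if stripped == [] || PySem.Chars.startswith stripped ['#'] || PySem.Chars.startswith stripped [';'] then
      detect_indent rest dflt
    else
      PySem.Str.slice line none (some ((PySem.Str.len line : Int) - (stripped.length : Int)))

-- first for-loop of _set_config_value; stripped.partition("=") ported by hand (exact for the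
-- one-char separator): key = chars before the first '=', sep nonempty iff '=' occurs
def find_option_idx (lines : List String) (idx stop : Nat) (option : String) : Option Nat :=
  if h : idx < stop then
    let stripped := PySem.Chars.strip (PySem.List.pyGetD lines (idx : Int) "").toList
    if stripped == [] || PySem.Chars.startswith stripped ['#'] || PySem.Chars.startswith stripped [';'] then
      find_option_idx lines (idx + 1) stop option
    else
      let key := stripped.takeWhile (fun c => c != '=')
      if stripped.contains '=' && (PySem.Chars.strip key == option.toList) then some idx
      else find_option_idx lines (idx + 1) stop option
  else none
termination_by stop - idx
decreasing_by all_goals omega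

-- second for-loop (with its for-else): first blank/comment index in [start, stop), else stop
def insertion_index (lines : List String) (idx stop : Nat) : Nat :=
  if h : idx < stop then
    let stripped := PySem.Chars.strip (PySem.List.pyGetD lines (idx : Int) "").toList
    if stripped == [] || PySem.Chars.startswith stripped ['#'] || PySem.Chars.startswith stripped [';'] then idx
    else insertion_index lines (idx + 1) stop
  else stop
termination_by stop - idx
decreasing_by all_goals omega

def set_config_value_py (lines : List String) (section_ : String) (option : String) (value : String) : List String :=
  match find_section_bounds lines section_ with
  | none =>
    if section_ != "DEFAULT" then
      lines ++ ["[" ++ section_ ++ "]", "\t" ++ option ++ " = " ++ value]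
    else
      lines ++ [option ++ " = " ++ value]
  | some (start, stop) =>
    let indent_default := if section_ == "DEFAULT" then "" else "\t"
    let indent := detect_indent (PySem.List.slice lines (some (start : Int)) (some (stop : Int))) indent_default
    let newLine := indent ++ option ++ " = " ++ value
    match find_option_idx lines start stop option with
    | some idx => lines.set idx newLine
    | none => PySem.List.insert lines ((insertion_index lines start stop : Nat) : Int) newLine

-- ===== PORT B =====
def bIsSkip (line : String) : Bool :=
  let s := PySem.Chars.strip line.toList
  s == [] || (match s with | [] => false | c :: _ => c == '#' || c == ';')

def bIsSectionHeader (line : String) : Bool :=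
  let s := PySem.Str.strip line
  PySem.Str.startswith s "[" && PySem.Str.endswith s "]"

-- the counting while-loop of _split_indent
def bIndentLen : List Char → Nat
  | [] => 0
  | c :: cs => if c == '\t' || c == ' ' then bIndentLen cs + 1 else 0

def bSplitIndent (line : String) : String × String :=
  let n := bIndentLen line.toList
  (String.ofList (line.toList.take n), String.ofList (line.toList.drop n))

-- partition("=") ported by hand, exactly as in port A
def bMatchesOption (line : String) (option : String) : Bool :=
  if bIsSkip line then false
  else
    let s := PySem.Chars.strip line.toList
    let key := s.takeWhile (fun c => c != '=')
    s.contains '=' && (PySem.Chars.strip key == option.toList)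

def bSplitAfterHeader (lines : List String) (header : String) : Option (List String × List String) :=
  match List.findIdx? (fun line => PySem.Str.strip line == header) lines with
  | some i => some (lines.take (i + 1), lines.drop (i + 1))
  | none => none

def bSplitAtSection (rest : List String) : List String × List String :=
  match List.findIdx? (fun line => bIsSectionHeader line) rest with
  | some j => (rest.take j, rest.drop j)
  | none => (rest, [])

def bDetectIndent : List String → String → String
  | [], dflt => dflt
  | line :: rest, dflt =>
    let (indent, tail) := bSplitIndent line
    match tail.toList with
    | [] => bDetectIndent rest dflt
    | c :: _ => if c == '#' || c == ';' then bDetectIndent rest dflt else indent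

def bReplaceOption (seg : List String) (option : String) (newLine : String) : Option (List String) :=
  match List.findIdx? (fun line => bMatchesOption line option) seg with
  | some k => some (seg.take k ++ [newLine] ++ seg.drop (k + 1))
  | none => none

def bInsertAtGap (seg : List String) (newLine : String) : List String :=
  match List.findIdx? (fun line => bIsSkip line) seg with
  | some k => seg.take k ++ [newLine] ++ seg.drop k
  | none => seg ++ [newLine]

def set_config_value_py_alt (lines : List String) (section_ : String) (option : String) (value : String) : List String :=
  let split? : Option (List String × List String × String) :=
    if section_ == "DEFAULT" then
      let skip : Nat :=
        if (match lines with
            | [] => false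
            | l0 :: _ => PySem.Str.lower (PySem.Str.strip l0) == "[default]") then 1 else 0
      some (lines.take skip, lines.drop skip, "")
    else
      match bSplitAfterHeader lines ("[" ++ section_ ++ "]") with
      | none => none
      | some (before, rest) => some (before, rest, "\t")
  match split? with
  | none => lines ++ ["[" ++ section_ ++ "]", "\t" ++ option ++ " = " ++ value]
  | some (before, rest, indentDefault) =>
    let (seg, after) := bSplitAtSection rest
    let newLine := bDetectIndent seg indentDefault ++ option ++ " = " ++ value
    let body :=
      match bReplaceOption seg option newLine with
      | some b => b
      | none => bInsertAtGap seg newLine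
    before ++ body ++ after

-- ===== PRECONDITION & SPEC =====
def Spec_set_config_value_py (lines : List String) (section_ : String) (option : String) (value : String) (out : List String) : Prop := out = set_config_value_py_alt lines section_ option value
instance (lines : List String) (section_ : String) (option : String) (value : String) (out : List String) : Decidable (Spec_set_config_value_py lines section_ option value out) := by unfold Spec_set_config_value_py; infer_instance

-- ===== CLAIM (what is proved, stated in full; the proofs are below) =====
def Claim_equal_set_config_value_py : Prop := ∀ (lines : List String) (section_ : String) (option : String) (value : String), Dom_set_config_value_py lines section_ option value → Spec_set_config_value_py lines section_ option value (set_config_value_py lines section_ option value)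

-- ===== LEMMAS AND PROOFS =====

-- proof-side recursive reformulations of B's find-first-index helpers
def hSplitAfterHeader (lines : List String) (header : String) : Option (List String × List String) :=
  match lines with
  | [] => none
  | head :: tail =>
    if PySem.Str.strip head == header then some ([head], tail)
    else
      match hSplitAfterHeader tail header with
      | none => none
      | some (pre, rest) => some (head :: pre, rest)

def hSplitAtSection : List String → List String × List String
  | [] => ([], [])
  | head :: tail =>
    if bIsSectionHeader head then ([], head :: tail)
    else
      let (seg, after) := hSplitAtSection tail
      (head :: seg, after)

def hReplaceOption (seg : List String) (option : String) (newLine : String) : Option (List String) :=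
  match seg with
  | [] => none
  | head :: tail =>
    if bMatchesOption head option then some (newLine :: tail)
    else
      match hReplaceOption tail option newLine with
      | none => none
      | some rest => some (head :: rest)

def hInsertAtGap (seg : List String) (newLine : String) : List String :=
  match seg with
  | [] => [newLine]
  | head :: tail => if bIsSkip head then newLine :: head :: tail else head :: hInsertAtGap tail newLine

theorem bSplitAfterHeader_eq_rec (header : String) (lines : List String) :
    bSplitAfterHeader lines header = hSplitAfterHeader lines header := by
  induction lines with
  | nil => rfl
  | cons x xs ih =>
    by_cases h : (PySem.Str.strip x == header) = true
    · simp [bSplitAfterHeader, hSplitAfterHeader, List.findIdx?_cons, h]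
    · rw [hSplitAfterHeader, if_neg h, ← ih]
      cases hf : List.findIdx? (fun line => PySem.Str.strip line == header) xs with
      | none => simp [bSplitAfterHeader, List.findIdx?_cons, h, hf]
      | some k => simp [bSplitAfterHeader, List.findIdx?_cons, h, hf]

theorem bSplitAtSection_eq_rec (rest : List String) :
    bSplitAtSection rest = hSplitAtSection rest := by
  induction rest with
  | nil => rfl
  | cons x xs ih =>
    by_cases h : bIsSectionHeader x = true
    · simp [bSplitAtSection, hSplitAtSection, List.findIdx?_cons, h]
    · rw [hSplitAtSection, if_neg h, ← ih]
      cases hf : List.findIdx? (fun line => bIsSectionHeader line) xs with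
      | none => simp [bSplitAtSection, List.findIdx?_cons, h, hf]
      | some k => simp [bSplitAtSection, List.findIdx?_cons, h, hf]

theorem bReplaceOption_eq_rec (option newLine : String) (seg : List String) :
    bReplaceOption seg option newLine = hReplaceOption seg option newLine := by
  induction seg with
  | nil => rfl
  | cons x xs ih =>
    by_cases h : bMatchesOption x option = true
    · simp [bReplaceOption, hReplaceOption, List.findIdx?_cons, h]
    · rw [hReplaceOption, if_neg h, ← ih]
      cases hf : List.findIdx? (fun line => bMatchesOption line option) xs with
      | none => simp [bReplaceOption, List.findIdx?_cons, h, hf]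
      | some k => simp [bReplaceOption, List.findIdx?_cons, h, hf]

theorem bInsertAtGap_eq_rec (newLine : String) (seg : List String) :
    bInsertAtGap seg newLine = hInsertAtGap seg newLine := by
  induction seg with
  | nil => rfl
  | cons x xs ih =>
    by_cases h : bIsSkip x = true
    · simp [bInsertAtGap, hInsertAtGap, List.findIdx?_cons, h]
    · rw [hInsertAtGap, if_neg h, ← ih]
      cases hf : List.findIdx? (fun line => bIsSkip line) xs with
      | none => simp [bInsertAtGap, List.findIdx?_cons, h, hf]
      | some k => simp [bInsertAtGap, List.findIdx?_cons, h, hf]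


theorem startswith_singleton (s : List Char) (c : Char) :
    PySem.Chars.startswith s [c] = (match s with | [] => false | d :: _ => d == c) := by
  cases s with
  | nil =>
    rw [show (match ([] : List Char) with | [] => false | d :: _ => d == c) = false from rfl]
    rw [← Bool.not_eq_true, PySem.Chars.startswith_iff]
    simp
  | cons d t =>
    rw [show (match (d :: t : List Char) with | [] => false | d :: _ => d == c) = (d == c) from rfl]
    by_cases hdc : d = c
    · subst hdc
      rw [show (d == d) = true by simp, PySem.Chars.startswith_iff, List.cons_prefix_cons]
      exact ⟨rfl, List.nil_prefix⟩
    · rw [show (d == c) = false by simp [hdc], ← Bool.not_eq_true, PySem.Chars.startswith_iff,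
        List.cons_prefix_cons]
      rintro ⟨h1, -⟩
      exact hdc h1.symm

theorem aSkip_eq_bIsSkip (l : String) :
    (PySem.Chars.strip l.toList == [] ||
      PySem.Chars.startswith (PySem.Chars.strip l.toList) ['#'] ||
      PySem.Chars.startswith (PySem.Chars.strip l.toList) [';']) = bIsSkip l := by
  unfold bIsSkip
  rw [startswith_singleton, startswith_singleton]
  cases h : PySem.Chars.strip l.toList with
  | nil => simp
  | cons c t => simp

theorem aIsNextHeader_eq (l : String) : aIsNextHeader l = bIsSectionHeader l := by
  unfold aIsNextHeader bIsSectionHeader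
  simp only [PySem.Str.startswith_eq]
  rw [show ("[" : String).toList = ['['] from rfl, show ("#" : String).toList = ['#'] from rfl]
  rw [startswith_singleton, startswith_singleton]
  cases h : (PySem.Str.strip l).toList with
  | nil => simp
  | cons c t =>
    by_cases hc : c = '['
    · subst hc; simp
    · simp [hc]

theorem hSplitAtSection_eq (rest : List String) :
    hSplitAtSection rest =
      (rest.takeWhile (fun l => !bIsSectionHeader l), rest.dropWhile (fun l => !bIsSectionHeader l)) := by
  induction rest with
  | nil => rfl
  | cons x xs ih =>
    by_cases h : bIsSectionHeader x
    · simp [hSplitAtSection, h]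
    · simp [hSplitAtSection, h, ih]

theorem bIndentLen_eq (cs : List Char) :
    bIndentLen cs = (cs.takeWhile (fun c => c == '\t' || c == ' ')).length := by
  induction cs with
  | nil => rfl
  | cons c t ih =>
    by_cases h : (c == '\t' || c == ' ') = true
    · simp [bIndentLen, h, List.takeWhile_cons, ih]
    · simp [bIndentLen, h, List.takeWhile_cons]

theorem take_takeWhile {α : Type} (p : α → Bool) (cs : List α) :
    cs.take ((cs.takeWhile p).length) = cs.takeWhile p := by
  induction cs with
  | nil => rfl
  | cons c t ih =>
    by_cases h : p c
    · simp [List.takeWhile_cons, h, ih]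
    · simp [List.takeWhile_cons, h]

theorem drop_takeWhile {α : Type} (p : α → Bool) (cs : List α) :
    cs.drop ((cs.takeWhile p).length) = cs.dropWhile p := by
  induction cs with
  | nil => rfl
  | cons c t ih =>
    by_cases h : p c
    · simp [List.takeWhile_cons, List.dropWhile_cons, h, ih]
    · simp [List.takeWhile_cons, List.dropWhile_cons, h]

theorem getD_append_cons {α : Type} (before rest : List α) (x d : α) :
    (before ++ x :: rest).getD before.length d = x := by
  induction before with
  | nil => rfl
  | cons b bs ih => simpa using ih

theorem set_append_cons {α : Type} (before rest : List α) (x y : α) :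
    (before ++ x :: rest).set before.length y = before ++ y :: rest := by
  induction before with
  | nil => rfl
  | cons b bs ih => simpa using ih

theorem pyGetD_append_cons (before rest : List String) (x : String) :
    PySem.List.pyGetD (before ++ x :: rest) ((before.length : Nat) : Int) "" = x := by
  rw [PySem.List.pyGetD_natCast]
  exact getD_append_cons before rest x ""

theorem find_next_section_aux (lines : List String) :
    ∀ (n idx : Nat), lines.length - idx ≤ n → idx ≤ lines.length →
      find_next_section lines idx =
        idx + ((lines.drop idx).takeWhile (fun l => !bIsSectionHeader l)).length := by
  intro n
  induction n with
  | zero =>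
    intro idx h1 h2
    have he : idx = lines.length := by omega
    rw [find_next_section, dif_neg (by omega), he]
    simp
  | succ n ih =>
    intro idx h1 h2
    by_cases hlt : idx < lines.length
    · rw [find_next_section, dif_pos hlt]
      have hget : PySem.List.pyGetD lines ((idx : Nat) : Int) "" = lines[idx] := by
        rw [PySem.List.pyGetD_natCast]
        exact List.getD_eq_getElem lines "" hlt
      have hdrop : lines.drop idx = lines[idx] :: lines.drop (idx + 1) :=
        List.drop_eq_getElem_cons hlt
      rw [hget, aIsNextHeader_eq]
      by_cases hh : bIsSectionHeader lines[idx]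
      · rw [if_pos hh, hdrop]
        simp [hh]
      · have hh' : bIsSectionHeader lines[idx] = false := by simpa using hh
        rw [if_neg hh, ih (idx + 1) (by omega) (by omega), hdrop]
        simp only [List.takeWhile_cons, hh', Bool.not_false, if_true, List.length_cons]
        omega
    · have he : idx = lines.length := by omega
      rw [find_next_section, dif_neg hlt, he]
      simp

theorem find_next_section_eq (lines : List String) (idx : Nat) (h : idx ≤ lines.length) :
    find_next_section lines idx =
      idx + ((lines.drop idx).takeWhile (fun l => !bIsSectionHeader l)).length :=
  find_next_section_aux lines (lines.length - idx) idx le_rfl h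

theorem find_header_idx_eq (header : String) (lines : List String) : ∀ before : List String,
    (match hSplitAfterHeader lines header with
     | some (pre, rest) =>
         find_header_idx (before ++ lines) header before.length = some (before.length + (pre.length - 1)) ∧
         lines = pre ++ rest ∧ 1 ≤ pre.length
     | none => find_header_idx (before ++ lines) header before.length = none) := by
  induction lines with
  | nil =>
    intro before
    simp only [hSplitAfterHeader]
    rw [find_header_idx, dif_neg (by simp)]
  | cons l ls ih =>
    intro before
    have hlt : before.length < (before ++ l :: ls).length := by simp
    by_cases hh : (PySem.Str.strip l == header) = true
    · simp only [hSplitAfterHeader, if_pos hh]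
      refine ⟨?_, by simp, by simp⟩
      rw [find_header_idx, dif_pos hlt, pyGetD_append_cons, if_pos hh]
      simp
    · have step : find_header_idx (before ++ l :: ls) header before.length
          = find_header_idx (before ++ l :: ls) header (before.length + 1) := by
        rw [find_header_idx, dif_pos hlt, pyGetD_append_cons, if_neg hh]
      have hre : before ++ l :: ls = (before ++ [l]) ++ ls := by simp
      have hib := ih (before ++ [l])
      simp only [hSplitAfterHeader, if_neg hh]
      cases hsp : hSplitAfterHeader ls header with
      | none =>
        rw [hsp] at hib
        have : find_header_idx ((before ++ [l]) ++ ls) header (before ++ [l]).length = none := hib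
        rw [step, hre]
        simpa using this
      | some pr =>
        obtain ⟨pre, rest⟩ := pr
        rw [hsp] at hib
        obtain ⟨h1, h2, h3⟩ := hib
        refine ⟨?_, by simp [h2], by simp⟩
        rw [step, hre]
        have h1' : find_header_idx ((before ++ [l]) ++ ls) header (before.length + 1)
            = some ((before ++ [l]).length + (pre.length - 1)) := by
          simpa using h1
        rw [h1']
        congr 1
        simp
        omega

theorem detect_indent_eq (seg : List String) (dflt : String) :
    detect_indent seg dflt = bDetectIndent seg dflt := by
  induction seg with
  | nil => rfl
  | cons line rest ih =>
    simp only [detect_indent, bDetectIndent, bSplitIndent]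
    rw [startswith_singleton, startswith_singleton]
    rw [bIndentLen_eq, String.toList_ofList, drop_takeWhile]
    cases hd : line.toList.dropWhile (fun c => c == '\t' || c == ' ') with
    | nil => simpa using ih
    | cons c t =>
      by_cases hc : (c == '#' || c == ';') = true
      · rcases Bool.or_eq_true_iff.mp hc with h | h
        · simp [h, ih]
        · simp [h, ih]
      · have h1 : (c == '#') = false := by
          rcases Bool.eq_false_or_eq_true (c == '#') with h | h
          · exact absurd (Bool.or_eq_true_iff.mpr (Or.inl h)) hc
          · exact h
        have h2 : (c == ';') = false := by
          rcases Bool.eq_false_or_eq_true (c == ';') with h | h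
          · exact absurd (Bool.or_eq_true_iff.mpr (Or.inr h)) hc
          · exact h
        simp only [h1, h2, Bool.or_false]
        rw [if_neg (show ¬(((c :: t : List Char) == []) = true) by simp),
            if_neg (show ¬((false : Bool) = true) by simp)]
        -- value equality: line[:len(line)-len(stripped)] is exactly the indent prefix
        apply String.toList_inj.mp
        rw [show ∀ (s : String) (e : Int), PySem.Str.slice s none (some e)
              = String.ofList (PySem.Chars.slice s.toList none (some e)) from fun s e => by simp [PySem.Str.slice]]
        rw [String.toList_ofList, String.toList_ofList, PySem.Chars.slice_eq_listSlice]
        have hlen : ((line.toList.takeWhile (fun c => c == '\t' || c == ' ')).length : Int)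
            = PySem.Str.len line - ((c :: t : List Char).length : Int) := by
          have hsplit := List.takeWhile_append_dropWhile (p := fun c => c == '\t' || c == ' ') (l := line.toList)
          have hl : (line.toList.takeWhile (fun c => c == '\t' || c == ' ')).length
              + (line.toList.dropWhile (fun c => c == '\t' || c == ' ')).length = line.toList.length := by
            rw [← List.length_append, hsplit]
          rw [hd] at hl
          rw [PySem.Str.len_eq]
          push_cast
          omega
        rw [← hlen, PySem.List.slice_to_natCast, take_takeWhile]

theorem find_option_idx_step (lines : List String) (idx stop : Nat) (option : String) (h : idx < stop) :
    find_option_idx lines idx stop option =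
      if bMatchesOption (PySem.List.pyGetD lines ((idx : Nat) : Int) "") option
      then some idx else find_option_idx lines (idx + 1) stop option := by
  rw [find_option_idx, dif_pos h]
  generalize PySem.List.pyGetD lines ((idx : Nat) : Int) "" = x
  by_cases hskip : bIsSkip x
  · rw [if_pos (by rw [aSkip_eq_bIsSkip]; exact hskip),
      if_neg (by simp [bMatchesOption, hskip])]
  · rw [if_neg (by rw [aSkip_eq_bIsSkip]; simp [hskip]),
      show bMatchesOption x option
        = (let s := PySem.Chars.strip x.toList
           s.contains '=' && (PySem.Chars.strip (s.takeWhile (fun c => c != '=')) == option.toList))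
        from by simp [bMatchesOption, hskip]]

theorem insertion_index_step (lines : List String) (idx stop : Nat) (h : idx < stop) :
    insertion_index lines idx stop =
      if bIsSkip (PySem.List.pyGetD lines ((idx : Nat) : Int) "")
      then idx else insertion_index lines (idx + 1) stop := by
  rw [insertion_index, dif_pos h]
  generalize PySem.List.pyGetD lines ((idx : Nat) : Int) "" = x
  by_cases hskip : bIsSkip x
  · rw [if_pos (by rw [aSkip_eq_bIsSkip]; exact hskip), if_pos hskip]
  · rw [if_neg (by rw [aSkip_eq_bIsSkip]; simp [hskip]), if_neg hskip]

theorem find_option_eq (option newLine : String) (seg : List String) :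
    ∀ before after : List String,
    (match find_option_idx (before ++ seg ++ after) before.length (before.length + seg.length) option with
     | some idx => some ((before ++ seg ++ after).set idx newLine)
     | none => (none : Option (List String)))
    = (hReplaceOption seg option newLine).map (fun b => before ++ b ++ after) := by
  induction seg with
  | nil =>
    intro before after
    rw [find_option_idx, dif_neg (by simp)]
    rfl
  | cons x xs ih =>
    intro before after
    have hget : PySem.List.pyGetD (before ++ (x :: xs) ++ after) ((before.length : Nat) : Int) "" = x := by
      rw [show before ++ (x :: xs) ++ after = before ++ x :: (xs ++ after) by simp]
      exact pyGetD_append_cons before (xs ++ after) x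
    rw [find_option_idx_step _ _ _ _ (by simp), hget]
    by_cases hm : bMatchesOption x option
    · rw [if_pos hm]
      rw [show hReplaceOption (x :: xs) option newLine = some (newLine :: xs) by
        simp [hReplaceOption, hm]]
      show some ((before ++ (x :: xs) ++ after).set before.length newLine) = _
      rw [show before ++ (x :: xs) ++ after = before ++ x :: (xs ++ after) by simp,
        set_append_cons]
      simp
    · rw [if_neg hm]
      have e1 : before ++ (x :: xs) ++ after = (before ++ [x]) ++ xs ++ after := by simp
      have e2 : before.length + (x :: xs).length = (before ++ [x]).length + xs.length := by
        simp only [List.length_append, List.length_cons, List.length_nil]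
        omega
      have e3 : before.length + 1 = (before ++ [x]).length := by simp
      rw [e1, e2, e3, ih (before ++ [x]) after]
      rw [show hReplaceOption (x :: xs) option newLine
          = (match hReplaceOption xs option newLine with
             | none => none
             | some rest => some (x :: rest)) by simp [hReplaceOption, hm]]
      cases hr : hReplaceOption xs option newLine with
      | none => rfl
      | some r => simp

theorem insertion_eq (newLine : String) (seg : List String) :
    ∀ before after : List String,
    PySem.List.insert (before ++ seg ++ after)
        ((insertion_index (before ++ seg ++ after) before.length (before.length + seg.length) : Nat) : Int) newLine
      = before ++ hInsertAtGap seg newLine ++ after := by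
  induction seg with
  | nil =>
    intro before after
    rw [insertion_index, dif_neg (by simp)]
    rw [PySem.List.insert_natCast _ _ _ (by simp)]
    simp [hInsertAtGap, List.take_left', List.drop_left']
  | cons x xs ih =>
    intro before after
    have hget : PySem.List.pyGetD (before ++ (x :: xs) ++ after) ((before.length : Nat) : Int) "" = x := by
      rw [show before ++ (x :: xs) ++ after = before ++ x :: (xs ++ after) by simp]
      exact pyGetD_append_cons before (xs ++ after) x
    rw [insertion_index_step _ _ _ (by simp), hget]
    by_cases hs : bIsSkip x
    · rw [if_pos hs]
      rw [PySem.List.insert_natCast _ _ _ (by simp)]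
      rw [show before ++ (x :: xs) ++ after = before ++ x :: (xs ++ after) by simp]
      rw [List.take_left' rfl, List.drop_left' rfl]
      simp [hInsertAtGap, hs]
    · rw [if_neg hs]
      have e1 : before ++ (x :: xs) ++ after = (before ++ [x]) ++ xs ++ after := by simp
      have e2 : before.length + (x :: xs).length = (before ++ [x]).length + xs.length := by
        simp only [List.length_append, List.length_cons, List.length_nil]
        omega
      have e3 : before.length + 1 = (before ++ [x]).length := by simp
      rw [e1, e2, e3, ih (before ++ [x]) after]
      simp [hInsertAtGap, hs]

-- the common tail of both programs, once the section segment is identified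
theorem tail_eq (before seg after : List String) (option value dflt : String) :
    (let lines := before ++ seg ++ after
     let indent := detect_indent (PySem.List.slice lines (some (before.length : Int)) (some ((before.length + seg.length : Nat) : Int))) dflt
     let newLine := indent ++ option ++ " = " ++ value
     match find_option_idx lines before.length (before.length + seg.length) option with
     | some idx => lines.set idx newLine
     | none => PySem.List.insert lines ((insertion_index lines before.length (before.length + seg.length) : Nat) : Int) newLine)
    = before ++ (let newLine := bDetectIndent seg dflt ++ option ++ " = " ++ value
                 match hReplaceOption seg option newLine with
                 | some b => b
                 | none => hInsertAtGap seg newLine) ++ after := by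
  have hslice : PySem.List.slice (before ++ seg ++ after) (some ((before.length : Nat) : Int))
      (some (((before.length + seg.length : Nat) : Nat) : Int)) = seg := by
    rw [PySem.List.slice_natCast]
    rw [show before ++ seg ++ after = before ++ (seg ++ after) by simp]
    rw [List.drop_left]
    rw [show before.length + seg.length - before.length = seg.length by omega]
    exact List.take_left' rfl
  simp only [hslice, detect_indent_eq]
  have hfo := find_option_eq option (bDetectIndent seg dflt ++ option ++ " = " ++ value) seg before after
  cases hr : hReplaceOption seg option (bDetectIndent seg dflt ++ option ++ " = " ++ value) with
  | some b =>
    rw [hr] at hfo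
    cases hf : find_option_idx (before ++ seg ++ after) before.length (before.length + seg.length) option with
    | none => rw [hf] at hfo; simp at hfo
    | some idx =>
      rw [hf] at hfo
      simp only [Option.map_some, Option.some.injEq] at hfo
      simpa using hfo
  | none =>
    rw [hr] at hfo
    cases hf : find_option_idx (before ++ seg ++ after) before.length (before.length + seg.length) option with
    | some idx => rw [hf] at hfo; simp at hfo
    | none =>
      simpa using insertion_eq (bDetectIndent seg dflt ++ option ++ " = " ++ value) seg before after

theorem segment_branch (before rest : List String) (option value dflt : String) :
    (let lines := before ++ rest
     let stop := find_next_section lines before.length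
     let indent := detect_indent (PySem.List.slice lines (some ((before.length : Nat) : Int)) (some ((stop : Nat) : Int))) dflt
     let newLine := indent ++ option ++ " = " ++ value
     match find_option_idx lines before.length stop option with
     | some idx => lines.set idx newLine
     | none => PySem.List.insert lines ((insertion_index lines before.length stop : Nat) : Int) newLine)
    = (let sa := bSplitAtSection rest
       let newLine := bDetectIndent sa.1 dflt ++ option ++ " = " ++ value
       let body := match bReplaceOption sa.1 option newLine with
                   | some b => b
                   | none => bInsertAtGap sa.1 newLine
       before ++ body ++ sa.2) := by
  simp only [bSplitAtSection_eq_rec, bReplaceOption_eq_rec, bInsertAtGap_eq_rec]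
  have hstop : find_next_section (before ++ rest) before.length
      = before.length + (rest.takeWhile (fun l => !bIsSectionHeader l)).length := by
    rw [find_next_section_eq _ _ (by simp), List.drop_left]
  have hrest : before ++ rest
      = before ++ rest.takeWhile (fun l => !bIsSectionHeader l) ++ rest.dropWhile (fun l => !bIsSectionHeader l) := by
    rw [List.append_assoc, List.takeWhile_append_dropWhile]
  simp only [hSplitAtSection_eq rest, hstop]
  rw [hrest]
  exact tail_eq before (rest.takeWhile (fun l => !bIsSectionHeader l))
    (rest.dropWhile (fun l => !bIsSectionHeader l)) option value dflt

set_option maxHeartbeats 1000000 in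
theorem main_eq (lines : List String) (section_ option value : String) :
    set_config_value_py lines section_ option value = set_config_value_py_alt lines section_ option value := by
  by_cases hd : (section_ == "DEFAULT") = true
  · unfold set_config_value_py set_config_value_py_alt find_section_bounds
    rw [if_pos hd, if_pos hd, if_pos hd]
    set k : Nat := (if (match lines with
        | [] => false
        | l0 :: _ => PySem.Str.lower (PySem.Str.strip l0) == "[default]") then 1 else 0) with hk
    have hk01 : k = 0 ∨ k = 1 := by
      rw [hk]; split_ifs
      · exact Or.inr rfl
      · exact Or.inl rfl
    have hkle : k ≤ lines.length := by
      cases lines with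
      | nil =>
        have : k = 0 := by rw [hk]; rfl
        omega
      | cons a l =>
        rcases hk01 with h | h <;> simp [h]
    have hlen : (lines.take k).length = k := List.length_take_of_le hkle
    have hsplit : lines = lines.take k ++ lines.drop k := (List.take_append_drop k lines).symm
    have hsb := segment_branch (lines.take k) (lines.drop k) option value ""
    rw [hlen] at hsb
    conv_lhs => rw [hsplit]
    simpa using hsb
  · have hd' : section_ ≠ "DEFAULT" := by simpa using hd
    unfold set_config_value_py set_config_value_py_alt find_section_bounds
    rw [if_neg hd, if_neg hd, if_neg hd]
    rw [bSplitAfterHeader_eq_rec]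
    have hfh := find_header_idx_eq ("[" ++ section_ ++ "]") lines []
    cases hsp : hSplitAfterHeader lines ("[" ++ section_ ++ "]") with
    | none =>
      rw [hsp] at hfh
      simp only [List.nil_append, List.length_nil] at hfh
      rw [hfh]
      simp [hd']
    | some pr =>
      obtain ⟨pre, rest⟩ := pr
      rw [hsp] at hfh
      simp only [List.nil_append, List.length_nil, Nat.zero_add] at hfh
      obtain ⟨h1, h2, h3⟩ := hfh
      rw [h1]
      have hpre : pre.length - 1 + 1 = pre.length := by omega
      have hsb := segment_branch pre rest option value "\t"
      conv_lhs => rw [h2]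
      simp only [hpre]
      simpa using hsb

-- ===== VERDICT (by name: the statement is the Claim_ definition above) =====
theorem set_config_value_py_spec : Claim_equal_set_config_value_py := by
  intro lines section_ option value _
  unfold Spec_set_config_value_py
  exact main_eq lines section_ option value
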